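-- pv_equiv track=rewrite | github.com/denphi/nanohub-citmanager | examples/agents/status3_classification.py | _is_scholar_captcha_page
-- ===== SOURCE A (Python) =====
-- def _is_scholar_captcha_page(html: str, status_code: int) -> bool:
--     """
--     Detect whether Google Scholar returned a CAPTCHA / bot-challenge page.
--
--     Signals:
--       • HTTP 429 or 503
--       • Page contains typical CAPTCHA markers
--     """
--     if status_code in (429, 503):
--         return True
--     if not html:
--         return False
--     low = html[:8000].lower()
--     captcha_markers = [
--         "unusual traffic",
--         "not a robot",
--         "recaptcha",
--         "captcha",
--         "sorry, we can",
--         "automated queries",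
--         "ipv4.google.com/sorry",
--     ]
--     return any(marker in low for marker in captcha_markers)
-- ===== SOURCE B (Python) =====
-- import re
--
-- # One compiled alternation of all CAPTCHA markers: a single regex search over the
-- # lowered prefix instead of one substring scan per marker.
-- _CAPTCHA_RE = re.compile("|".join(re.escape(m) for m in (
--     "unusual traffic",
--     "not a robot",
--     "recaptcha",
--     "captcha",
--     "sorry, we can",
--     "automated queries",
--     "ipv4.google.com/sorry",
-- )))
--
-- def _is_scholar_captcha_page(html: str, status_code: int) -> bool:
--     if status_code in (429, 503):
--         return True
--     return bool(html) and _CAPTCHA_RE.search(html[:8000].lower()) is not None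
-- ===== Notes on version B (the rewrite author's own statement) =====
-- stated objective: idiomatic
-- what changed: Replaces the seven per-marker 'marker in low' substring scans by one compiled regex alternation searched once over the lowered 8000-char prefix, and collapses the empty-html guard into a boolean expression.
import Mathlib
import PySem

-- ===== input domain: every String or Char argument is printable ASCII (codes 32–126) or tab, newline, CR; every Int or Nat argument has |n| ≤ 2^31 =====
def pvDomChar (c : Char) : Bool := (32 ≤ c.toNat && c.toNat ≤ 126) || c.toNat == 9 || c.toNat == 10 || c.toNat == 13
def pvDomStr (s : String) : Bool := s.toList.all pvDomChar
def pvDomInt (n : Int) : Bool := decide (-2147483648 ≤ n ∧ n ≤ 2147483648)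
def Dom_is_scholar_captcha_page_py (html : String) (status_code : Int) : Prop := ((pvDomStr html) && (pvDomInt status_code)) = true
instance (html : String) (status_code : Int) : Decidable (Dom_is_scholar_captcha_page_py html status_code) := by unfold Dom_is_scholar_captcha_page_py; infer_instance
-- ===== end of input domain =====

-- B replaces A's seven per-marker substring scans by one regex-alternation search
-- over the lowered prefix; objective: idiomatic.

-- ===== PORT A =====
def is_scholar_captcha_page_py (html : String) (status_code : Int) : Bool :=
  if status_code = 429 || status_code = 503 then true
  else if html.toList.isEmpty then false
  else
    let low := PySem.Chars.lower (PySem.List.slice html.toList none (some 8000))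
    let captcha_markers : List (List Char) :=
      [ "unusual traffic".toList, "not a robot".toList, "recaptcha".toList,
        "captcha".toList, "sorry, we can".toList, "automated queries".toList,
        "ipv4.google.com/sorry".toList ]
    captcha_markers.any (fun marker => PySem.Chars.isIn marker low)

-- ===== PORT B =====
-- the compiled alternation of the seven escaped literal markers
def pvCaptchaPats : List (List Char) :=
  [ "unusual traffic".toList, "not a robot".toList, "recaptcha".toList,
    "captcha".toList, "sorry, we can".toList, "automated queries".toList,
    "ipv4.google.com/sorry".toList ]

-- re.search of a literal-alternation pattern: try each start position left to right
-- (exact semantics of searching an escaped-literal alternation; no backtracking subtleties)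
def pvReSearchSome (pats : List (List Char)) (text : List Char) : Bool :=
  (List.range (text.length + 1)).any
    (fun i => pats.any (fun p => p.isPrefixOf (text.drop i)))

def is_scholar_captcha_page_py_alt (html : String) (status_code : Int) : Bool :=
  status_code == 429 || status_code == 503 ||
    (!html.toList.isEmpty &&
      pvReSearchSome pvCaptchaPats
        (PySem.Chars.lower (PySem.List.slice html.toList none (some 8000))))

-- ===== PRECONDITION & SPEC =====
def Spec_is_scholar_captcha_page_py (html : String) (status_code : Int) (out : Bool) : Prop := out = is_scholar_captcha_page_py_alt html status_code
instance (html : String) (status_code : Int) (out : Bool) : Decidable (Spec_is_scholar_captcha_page_py html status_code out) := by unfold Spec_is_scholar_captcha_page_py; infer_instance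

-- ===== CLAIM =====
def Claim_equal_is_scholar_captcha_page_py : Prop := ∀ (html : String) (status_code : Int), Dom_is_scholar_captcha_page_py html status_code → Spec_is_scholar_captcha_page_py html status_code (is_scholar_captcha_page_py html status_code)

-- ===== LEMMAS AND PROOFS =====

-- the position scan equals "some pattern occurs as a substring" (patterns nonempty)
theorem pvReSearchSome_eq_any_isIn (text : List Char) :
    pvReSearchSome pvCaptchaPats text
      = pvCaptchaPats.any (fun p => PySem.Chars.isIn p text) := by
  rw [Bool.eq_iff_iff]
  simp only [pvReSearchSome, List.any_eq_true, List.mem_range]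
  constructor
  · rintro ⟨i, _, p, hp, hpre⟩
    exact ⟨p, hp, (PySem.Chars.exists_prefix_drop_iff_isIn p text).mp
      ⟨i, List.isPrefixOf_iff_prefix.mp hpre⟩⟩
  · rintro ⟨p, hp, hin⟩
    obtain ⟨j, hpre⟩ := (PySem.Chars.exists_prefix_drop_iff_isIn p text).mpr hin
    have hpne : p ≠ [] := by
      simp only [pvCaptchaPats, List.mem_cons, List.not_mem_nil, or_false] at hp
      rcases hp with rfl | rfl | rfl | rfl | rfl | rfl | rfl <;> decide
    by_cases hj : j < text.length + 1
    · exact ⟨j, hj, p, hp, List.isPrefixOf_iff_prefix.mpr hpre⟩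
    · exfalso
      have : text.drop j = [] := List.drop_eq_nil_of_le (by omega)
      rw [this, List.prefix_nil] at hpre
      exact hpne hpre

-- ===== VERDICT =====
theorem is_scholar_captcha_page_py_spec : Claim_equal_is_scholar_captcha_page_py := by
  intro html status_code _
  unfold Spec_is_scholar_captcha_page_py is_scholar_captcha_page_py is_scholar_captcha_page_py_alt
  rw [pvReSearchSome_eq_any_isIn]
  split_ifs with h1 h2
  · have : (status_code == 429 || status_code == 503) = true := by
      rcases Bool.or_eq_true_iff.mp h1 with h | h <;>
        simp [decide_eq_true_eq.mp h]
    rw [this, Bool.true_or]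
  · simp_all
  · have hb : (status_code == 429 || status_code == 503) = false := by
      simpa using h1
    have he : html.toList.isEmpty = false := by
      simpa using h2
    rw [hb, he]
    simp [pvCaptchaPats]
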